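-- pv_equiv track=rewrite | github.com/Balaji2601/py_codes | day7/sumequal.py | sum_equal
-- ===== SOURCE A (Python) =====
-- def column_sum(arr, index):
--     ans = 0
--     for i in range(len(arr)):
--         ans += arr[i][index]
--     return ans
--
-- def row_sum(arr, index):
--     ans = 0
--     for i in range(len(arr[0])):
--         ans += arr[index][i]
--     return ans
--
-- def sum_equal(arr):
--     ans = []
--     for i in range(len(arr)):
--         rs = row_sum(arr, i)
--         for index in range(len(arr[0])):
--             if rs == column_sum(arr, index):
--                 ans.append((i, index))
--     return ans
-- ===== SOURCE B (Python) =====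
-- def sum_equal(arr):
--     # Precompute all row sums and column sums once, then compare every pair.
--     m = len(arr[0]) if arr else 0
--     rows = [sum(r) for r in arr]
--     cols = [sum(r[j] for r in arr) for j in range(m)]
--     return [(i, j) for i in range(len(arr)) for j in range(m) if rows[i] == cols[j]]
-- ===== Notes on version B (the rewrite author's own statement) =====
-- stated objective: faster
-- what changed: B precomputes the list of row sums and the list of column sums once and then compares them in a double loop, instead of A's recomputing a full O(n) column sum inside the inner loop for every (row, column) pair.
-- outside the precondition, e.g. on sum_equal([[1], [1, 1]]): A returns [], B returns [(1, 0)]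
import Mathlib
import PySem

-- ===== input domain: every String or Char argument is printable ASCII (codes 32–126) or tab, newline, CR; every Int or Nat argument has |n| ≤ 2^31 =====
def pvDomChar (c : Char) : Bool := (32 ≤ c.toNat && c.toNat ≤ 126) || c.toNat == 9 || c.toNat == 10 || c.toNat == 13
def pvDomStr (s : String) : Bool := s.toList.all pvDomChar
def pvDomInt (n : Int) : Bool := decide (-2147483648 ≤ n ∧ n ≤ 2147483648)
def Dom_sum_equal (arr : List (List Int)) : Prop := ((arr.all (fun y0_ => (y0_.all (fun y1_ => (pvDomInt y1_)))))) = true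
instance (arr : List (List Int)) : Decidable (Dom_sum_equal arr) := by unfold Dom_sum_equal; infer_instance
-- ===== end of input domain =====

-- B precomputes row sums and column sums once (O(n*m)) instead of A's recomputation of a
-- column sum inside the inner loop (O(n^2*m)); equal output on rectangular inputs.


-- ===== PORT A =====
def pvColumnSum (arr : List (List Int)) (index : Int) : Int :=
  (PySem.List.pyRange 0 (PySem.List.len arr)).foldl
    (fun ans i => ans + PySem.List.pyGetD (PySem.List.pyGetD arr i []) index 0) 0

def pvRowSum (arr : List (List Int)) (index : Int) : Int :=
  (PySem.List.pyRange 0 (PySem.List.len (PySem.List.pyGetD arr 0 []))).foldl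
    (fun ans i => ans + PySem.List.pyGetD (PySem.List.pyGetD arr index []) i 0) 0

def sum_equal (arr : List (List Int)) : List (Int × Int) :=
  (PySem.List.pyRange 0 (PySem.List.len arr)).foldl (fun ans i =>
    let rs := pvRowSum arr i
    (PySem.List.pyRange 0 (PySem.List.len (PySem.List.pyGetD arr 0 []))).foldl
      (fun ans index =>
        if rs = pvColumnSum arr index then ans ++ [(i, index)] else ans) ans) []

-- ===== PORT B =====
def sum_equal_alt (arr : List (List Int)) : List (Int × Int) :=
  let m : Int := if arr = [] then 0 else PySem.List.len (PySem.List.pyGetD arr 0 [])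
  let rows : List Int := arr.map List.sum
  let cols : List Int :=
    (PySem.List.pyRange 0 m).map (fun j => (arr.map (fun r => PySem.List.pyGetD r j 0)).sum)
  (PySem.List.pyRange 0 (PySem.List.len arr)).flatMap (fun i =>
    ((PySem.List.pyRange 0 m).filter
        (fun j => PySem.List.pyGetD rows i 0 == PySem.List.pyGetD cols j 0)).map
      (fun j => (i, j)))

-- ===== PRECONDITION & SPEC =====
-- Pre_ restricts to rectangular arrays, the function's natural matrix domain: A raises
-- IndexError when some row is shorter than row 0, and on rows longer than row 0 it silently
-- ignores the extra trailing elements in the row sum.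
def Pre_sum_equal (arr : List (List Int)) : Prop :=
  ∀ r ∈ arr, r.length = (arr.headD []).length
instance (arr : List (List Int)) : Decidable (Pre_sum_equal arr) := by
  unfold Pre_sum_equal; infer_instance

def pvWitness_sum_equal : List (List Int) := [[1, 2], [3, 0]]

def Spec_sum_equal (arr : List (List Int)) (out : List (Int × Int)) : Prop := out = sum_equal_alt arr
instance (arr : List (List Int)) (out : List (Int × Int)) : Decidable (Spec_sum_equal arr out) := by unfold Spec_sum_equal; infer_instance

-- ===== CLAIM (what is proved, stated in full; the proofs are below) =====
def Claim_equal_sum_equal : Prop := ∀ (arr : List (List Int)), Dom_sum_equal arr → Pre_sum_equal arr → Spec_sum_equal arr (sum_equal arr)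

-- ===== LEMMAS AND PROOFS =====

theorem pv_decide_beq (a b : Int) : decide (a = b) = (a == b) := by
  by_cases h : a = b <;> simp [h]

-- row i of a rectangular matrix, fetched with a valid index, has row-0's length
theorem pv_row_len (arr : List (List Int)) (h : Pre_sum_equal arr) (i : Int)
    (h0 : 0 ≤ i) (h1 : i < (arr.length : Int)) :
    (PySem.List.pyGetD arr i []).length = (arr.headD []).length := by
  rw [PySem.List.pyGetD_eq_getElem arr [] h0 h1]
  exact h _ (arr.getElem_mem _)

theorem pv_rowSum_eq (arr : List (List Int)) (h : Pre_sum_equal arr) (hne : arr ≠ [])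
    (i : Int) (h0 : 0 ≤ i) (h1 : i < (arr.length : Int)) :
    pvRowSum arr i = PySem.List.pyGetD (arr.map List.sum) i 0 := by
  unfold pvRowSum
  rw [PySem.List.foldl_add]
  have hz : PySem.List.pyGetD arr (0 : Int) [] = arr.headD [] := by
    cases arr with
    | nil => simp at hne
    | cons a t => rw [PySem.List.pyGetD_zero_cons]; rfl
  have hlen : PySem.List.len (PySem.List.pyGetD arr (0 : Int) [])
      = PySem.List.len (PySem.List.pyGetD arr i []) := by
    simp only [PySem.List.len, hz]
    rw [pv_row_len arr h i h0 h1]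
  rw [hlen, PySem.List.map_pyGetD_pyRange_zero]
  have : (0 : Int) = List.sum ([] : List Int) := by simp
  rw [this, PySem.List.pyGetD_map]
  simp

theorem pv_colSum_eq (arr : List (List Int)) (j : Int) :
    pvColumnSum arr j = (arr.map (fun r => PySem.List.pyGetD r j 0)).sum := by
  unfold pvColumnSum
  rw [PySem.List.foldl_add]
  have : (fun i => PySem.List.pyGetD (PySem.List.pyGetD arr i ([] : List Int)) j 0)
      = (fun r => PySem.List.pyGetD r j 0) ∘ (fun i => PySem.List.pyGetD arr i []) := rfl
  rw [this, ← List.map_map, PySem.List.map_pyGetD_pyRange_zero]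
  simp

-- ===== VERDICT (by name: the statement is the Claim_ definition above) =====
theorem sum_equal_spec : Claim_equal_sum_equal := by
  intro arr _ hpre
  unfold Spec_sum_equal sum_equal sum_equal_alt
  by_cases hne : arr = []
  · subst hne; rfl
  · simp only [if_neg hne]
    have hz : PySem.List.pyGetD arr (0 : Int) [] = arr.headD [] := by
      cases arr with
      | nil => exact absurd rfl hne
      | cons a t => rw [PySem.List.pyGetD_zero_cons]; rfl
    set m : Int := PySem.List.len (PySem.List.pyGetD arr (0 : Int) []) with hm
    set cols : List Int :=
      (PySem.List.pyRange 0 m).map (fun j => (arr.map (fun r => PySem.List.pyGetD r j 0)).sum)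
      with hcols
    -- turn A's nested foldl into a flatMap
    rw [PySem.List.foldl_congr_mem _ _
        (fun ans i => ans ++
          ((PySem.List.pyRange 0 m).filter
              (fun j => decide (pvRowSum arr i = pvColumnSum arr j))).map (fun j => (i, j))) _
        (by
          intro acc i _
          simp only []
          rw [PySem.List.foldl_append_ite (fun idx => pvRowSum arr i = pvColumnSum arr idx)
              (fun idx => (i, idx))])]
    rw [PySem.List.foldl_append_eq_flatMap, List.nil_append]
    -- both sides are flatMaps over the same range; compare pointwise
    rw [List.flatMap_def, List.flatMap_def]
    congr 1
    apply List.map_congr_left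
    intro i hi
    rw [PySem.List.mem_pyRange_one] at hi
    congr 1
    apply List.filter_congr
    intro j hj
    rw [PySem.List.mem_pyRange_one] at hj
    rw [pv_rowSum_eq arr hpre hne i hi.1 hi.2, pv_colSum_eq arr j]
    rw [pv_decide_beq]
    congr 1
    rw [hcols]
    rw [PySem.List.pyGetD_map_pyRange_of_nonneg _ m j 0 hj.1 hj.2]
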